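-- pv_equiv track=rewrite | github.com/Wycke/Naive-Bayes-Classifier | naiveBayes.py | create_vocab
-- ===== SOURCE A (Python) =====
-- def create_vocab(wordlist, trainingList):
--
--     punc = '''!()[]{}:?,.;'"<>/@#$%^&*~`_+=|'''
--     spacing = '''-'''
--
--     for i in range(len(trainingList)):
--         newString = trainingList[i]
--
--         for ele in newString:
--             if ele in punc:
--                 newString = newString.replace(ele, "")
--             if ele in spacing:
--                 newString = newString.replace(ele, " ")
--
--         newString = newString.lower()
--         newString = newString.split()
--
--         for j in range(len(newString)-1):
--             wordlist.append(newString[j])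
--
--     return wordlist
-- ===== SOURCE B (Python) =====
-- _PUNC = '''!()[]{}:?,.;'"<>/@#$%^&*~`_+=|'''
-- _TABLE = {ord(c): None for c in _PUNC}
-- _TABLE[ord('-')] = ' '
--
-- def create_vocab(wordlist, trainingList):
--     for s in trainingList:
--         tokens = s.translate(_TABLE).lower().split()
--         wordlist.extend(tokens[:-1])
--     return wordlist
-- ===== Notes on version B (the rewrite author's own statement) =====
-- stated objective: idiomatic
-- what changed: Replaces A's per-character repeated str.replace passes (each rescanning and rebuilding the whole string) with one table-driven str.translate pass per string, and extends wordlist with tokens[:-1] instead of an index loop.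
import Mathlib
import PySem

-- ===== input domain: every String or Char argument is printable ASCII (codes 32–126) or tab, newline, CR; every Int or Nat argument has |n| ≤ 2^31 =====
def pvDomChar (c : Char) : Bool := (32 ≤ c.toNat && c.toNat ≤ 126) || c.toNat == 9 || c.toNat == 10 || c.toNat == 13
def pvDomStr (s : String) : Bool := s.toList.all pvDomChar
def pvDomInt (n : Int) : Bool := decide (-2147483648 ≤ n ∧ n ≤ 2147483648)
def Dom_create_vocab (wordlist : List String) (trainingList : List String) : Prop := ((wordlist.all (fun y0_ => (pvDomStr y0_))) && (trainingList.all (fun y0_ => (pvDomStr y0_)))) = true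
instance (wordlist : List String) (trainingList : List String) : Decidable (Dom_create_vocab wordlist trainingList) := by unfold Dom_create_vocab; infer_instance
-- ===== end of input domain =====

set_option maxHeartbeats 1000000

-- B replaces A's per-character repeated str.replace passes with one table-driven
-- str.translate pass per string (and tokens[:-1] instead of an index loop); objective: idiomatic.
-- Both versions mutate `wordlist` in place in Python (A appends, B extends) — the same
-- observable side effect; the theorems below are about the returned value.

-- ===== PORT A =====
def pvPuncS : String := "!()[]{}:?,.;'\"<>/@#$%^&*~`_+=|"
def pvSpacingS : String := "-"

-- one iteration of A's inner `for ele in newString` loop body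
def pvStepA (ns : String) (ele : Char) : String :=
  let nsA := if pvPuncS.toList.contains ele then PySem.Str.replace ns (String.ofList [ele]) "" else ns
  if pvSpacingS.toList.contains ele then PySem.Str.replace nsA (String.ofList [ele]) " " else nsA

-- the body of A's outer loop, for one training string
def pvBodyA (wl : List String) (ns0 : String) : List String :=
  let ns1 := ns0.toList.foldl pvStepA ns0
  let ns2 := PySem.Str.lower ns1
  let tokens := PySem.Str.split₀ ns2
  (PySem.List.pyRange 0 (PySem.List.len tokens - 1) 1).foldl
    (fun wl2 j => wl2 ++ [PySem.List.pyGetD tokens j ""]) wl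

def create_vocab (wordlist : List String) (trainingList : List String) : List String :=
  (PySem.List.pyRange 0 (PySem.List.len trainingList) 1).foldl
    (fun wl i => pvBodyA wl (PySem.List.pyGetD trainingList i "")) wordlist

-- ===== PORT B =====
-- B's translation table _TABLE: punctuation chars map to None (deleted), '-' maps to ' '
def pvTrans (ch : Char) : Option Char :=
  if pvPuncS.toList.contains ch then none
  else if ch == '-' then some ' ' else some ch

-- B's str.translate(_TABLE): one table-driven pass over the characters
def pvCleanB (s : String) : String := String.ofList (s.toList.filterMap pvTrans)

-- the body of B's loop, for one training string
def pvBodyB (wl : List String) (s : String) : List String :=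
  let tokens := PySem.Str.split₀ (PySem.Str.lower (pvCleanB s))
  wl ++ PySem.List.slice tokens none (some (-1))

def create_vocab_alt (wordlist : List String) (trainingList : List String) : List String :=
  trainingList.foldl pvBodyB wordlist

-- ===== PRECONDITION & SPEC =====
def Spec_create_vocab (wordlist : List String) (trainingList : List String) (out : List String) : Prop := out = create_vocab_alt wordlist trainingList
instance (wordlist : List String) (trainingList : List String) (out : List String) : Decidable (Spec_create_vocab wordlist trainingList out) := by unfold Spec_create_vocab; infer_instance

-- ===== CLAIM (what is proved, stated in full; the proofs are below) =====
def Claim_equal_create_vocab : Prop := ∀ (wordlist : List String) (trainingList : List String), Dom_create_vocab wordlist trainingList → Spec_create_vocab wordlist trainingList (create_vocab wordlist trainingList)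

-- ===== LEMMAS AND PROOFS =====

-- list-level version of A's inner loop body
def pvStepAL (ns : List Char) (ele : Char) : List Char :=
  let nsA := if pvPuncS.toList.contains ele then PySem.Chars.replace ns [ele] [] else ns
  if pvSpacingS.toList.contains ele then PySem.Chars.replace nsA [ele] [' '] else nsA

-- the cleaning decision after the set `p` of characters has been processed
def pvG (p : List Char) (c : Char) : Option Char :=
  if c ∈ pvPuncS.toList ∧ c ∈ p then none
  else if c = '-' ∧ '-' ∈ p then some ' ' else some c

lemma pv_dash_not_punc : ('-' : Char) ∉ pvPuncS.toList := by decide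
lemma pv_space_not_punc : (' ' : Char) ∉ pvPuncS.toList := by decide

lemma pv_toList_stepA (ns : String) (ele : Char) :
    (pvStepA ns ele).toList = pvStepAL ns.toList ele := by
  unfold pvStepA pvStepAL
  split_ifs <;> simp [PySem.Str.toList_replace]

lemma pv_foldl_stepA_toList (l : List Char) (ns : String) :
    (l.foldl pvStepA ns).toList = l.foldl pvStepAL ns.toList := by
  induction l generalizing ns with
  | nil => rfl
  | cons e t ih => simp [List.foldl_cons, ih, pv_toList_stepA]

lemma pv_go_single (c : Char) (new : List Char) :
    ∀ (fuel : Nat) (l acc : List Char), l.length ≤ fuel →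
      PySem.Chars.replace.go [c] new fuel l acc
        = acc.reverse ++ l.flatMap (fun x => if x = c then new else [x]) := by
  intro fuel
  induction fuel with
  | zero =>
    intro l acc h
    have : l = [] := List.length_eq_zero_iff.mp (Nat.le_zero.mp h)
    subst this
    simp [PySem.Chars.replace.go]
  | succ n ih =>
    intro l acc h
    cases l with
    | nil => simp [PySem.Chars.replace.go]
    | cons x t =>
      by_cases hx : x = c
      · subst hx
        have hpre : ([x].isPrefixOf (x :: t)) = true := by simp [List.isPrefixOf]
        simp only [PySem.Chars.replace.go, hpre, if_pos]
        rw [ih _ _ (by simpa using Nat.le_of_succ_le_succ h)]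
        simp
      · have hpre : ([c].isPrefixOf (x :: t)) = false := by
          simp [List.isPrefixOf]
          exact fun h' => absurd h'.symm hx
        simp only [PySem.Chars.replace.go, hpre, Bool.false_eq_true, if_false]
        rw [ih _ _ (by simpa using Nat.le_of_succ_le_succ h)]
        simp [hx]

lemma pv_replace_single (c : Char) (new s : List Char) :
    PySem.Chars.replace s [c] new = s.flatMap (fun x => if x = c then new else [x]) := by
  unfold PySem.Chars.replace
  simp only [List.isEmpty_cons, Bool.false_eq_true, if_false]
  simpa using pv_go_single c new s.length s [] (le_refl _)

lemma pv_replace_del (c : Char) (s : List Char) :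
    PySem.Chars.replace s [c] [] = s.filterMap (fun x => if x = c then none else some x) := by
  rw [pv_replace_single]
  induction s with
  | nil => rfl
  | cons x t ih =>
    simp only [List.flatMap_cons, List.filterMap_cons]
    by_cases h : x = c <;> simp [h, ih]

lemma pv_replace_sp (c : Char) (s : List Char) :
    PySem.Chars.replace s [c] [' '] = s.map (fun x => if x = c then ' ' else x) := by
  rw [pv_replace_single]
  induction s with
  | nil => rfl
  | cons x t ih =>
    simp only [List.flatMap_cons, List.map_cons]
    by_cases h : x = c <;> simp [h, ih]

lemma pv_step_g (s0 p : List Char) (ele : Char) :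
    pvStepAL (s0.filterMap (pvG p)) ele = s0.filterMap (pvG (p ++ [ele])) := by
  unfold pvStepAL
  by_cases h1 : pvPuncS.toList.contains ele
  · have h1' : ele ∈ pvPuncS.toList := by simpa using h1
    have hne : ele ≠ '-' := fun h => pv_dash_not_punc (h ▸ h1')
    have hsp : (' ' : Char) ≠ ele := fun h => pv_space_not_punc (h ▸ h1')
    have h2 : pvSpacingS.toList.contains ele = false := by
      simpa [pvSpacingS] using hne
    simp only [h1, if_pos, h2, Bool.false_eq_true, if_false]
    rw [pv_replace_del, List.filterMap_filterMap]
    apply List.filterMap_congr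
    intro c _
    unfold pvG
    by_cases hc : c ∈ pvPuncS.toList <;>
    by_cases hp : c ∈ p <;>
    by_cases hd : c = '-' <;>
    by_cases hdp : ('-' : Char) ∈ p <;>
    by_cases hce : c = ele <;>
      simp_all [List.mem_append, Option.bind]
  · by_cases h2 : pvSpacingS.toList.contains ele
    · have he : ele = '-' := by
        have := List.contains_iff_mem.mp h2
        simpa [pvSpacingS] using this
      subst he
      simp only [h1, Bool.false_eq_true, if_false, h2, if_pos]
      rw [pv_replace_sp, ← List.filterMap_eq_map, List.filterMap_filterMap]
      apply List.filterMap_congr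
      intro c _
      unfold pvG
      by_cases hc : c ∈ pvPuncS.toList <;>
      by_cases hp : c ∈ p <;>
      by_cases hd : c = '-' <;>
      by_cases hdp : ('-' : Char) ∈ p <;>
        simp_all [List.mem_append, Option.bind, pv_dash_not_punc]
    · have hne : ele ≠ '-' := by
        intro h; subst h; simp [pvSpacingS] at h2
      have hnp : ele ∉ pvPuncS.toList := by simpa using h1
      simp only [h1, Bool.false_eq_true, if_false, h2]
      apply List.filterMap_congr
      intro c _
      unfold pvG
      by_cases hc : c ∈ pvPuncS.toList <;>
      by_cases hp : c ∈ p <;>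
      by_cases hd : c = '-' <;>
      by_cases hce : c = ele <;>
        simp_all [List.mem_append]

lemma pv_invar (s0 : List Char) :
    ∀ (l p : List Char), l.foldl pvStepAL (s0.filterMap (pvG p)) = s0.filterMap (pvG (p ++ l)) := by
  intro l
  induction l with
  | nil => intro p; simp
  | cons e t ih =>
    intro p
    rw [List.foldl_cons, pv_step_g, ih (p ++ [e])]
    simp

lemma pv_clean_eq (s : String) : s.toList.foldl pvStepA s = pvCleanB s := by
  apply String.toList_inj.mp
  rw [pv_foldl_stepA_toList]
  have h0 : s.toList.filterMap (pvG []) = s.toList := by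
    simp [pvG]
  have hinv := pv_invar s.toList s.toList []
  rw [h0, List.nil_append] at hinv
  rw [hinv]
  unfold pvCleanB
  rw [String.toList_ofList]
  apply List.filterMap_congr
  intro c hc
  unfold pvG pvTrans
  by_cases h1 : c ∈ pvPuncS.toList
  · simp [h1, hc]
  · by_cases h2 : c = '-'
    · subst h2; simp [h1, hc]
    · simp [h1, h2]

lemma pv_inner_loop (tokens : List String) (wl : List String) :
    (PySem.List.pyRange 0 ((tokens.length : Int) - 1) 1).foldl
      (fun wl2 j => wl2 ++ [PySem.List.pyGetD tokens j ""]) wl = wl ++ tokens.dropLast := by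
  cases tokens with
  | nil => simp [PySem.List.pyRange_one_eq_nil]
  | cons x t =>
    have hlen : ((x :: t).length : Int) - 1 = ((x :: t).dropLast.length : Int) := by
      simp
    rw [hlen]
    rw [PySem.List.foldl_congr_mem _ _
      (fun wl2 j => wl2 ++ [PySem.List.pyGetD (x :: t).dropLast j ""]) wl ?_]
    · rw [PySem.List.foldl_pyRange_zero_pyGetD' (x :: t).dropLast ""
        (fun acc y => acc ++ [y]) wl]
      rw [PySem.List.foldl_append_eq_flatMap]
      simp
    · intro acc j hj
      rw [PySem.List.mem_pyRange_one] at hj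
      have hj' : j < ((x :: t).dropLast.length : Int) := hj.2
      have hjfull : j < (((x :: t).length : Int)) := by
        simp only [List.length_dropLast, List.length_cons] at hj' ⊢
        omega
      show acc ++ [PySem.List.pyGetD (x :: t) j ""]
        = acc ++ [PySem.List.pyGetD (x :: t).dropLast j ""]
      rw [PySem.List.pyGetD_eq_getElem _ _ hj.1 hjfull,
        PySem.List.pyGetD_eq_getElem _ _ hj.1 hj']
      simp [List.getElem_dropLast]

lemma pv_body_eq (wl : List String) (s : String) : pvBodyA wl s = pvBodyB wl s := by
  simp only [pvBodyA, pvBodyB, pv_clean_eq, PySem.List.len_eq, pv_inner_loop,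
    PySem.List.slice_to_neg_one]

-- ===== VERDICT (by name: the statement is the Claim_ definition above) =====
theorem create_vocab_spec : Claim_equal_create_vocab := by
  intro wordlist trainingList _
  unfold Spec_create_vocab create_vocab create_vocab_alt
  rw [show PySem.List.len trainingList = (trainingList.length : Int) from
    PySem.List.len_eq _]
  rw [PySem.List.foldl_pyRange_zero_pyGetD' trainingList "" pvBodyA wordlist]
  exact PySem.List.foldl_congr_mem _ _ _ _ (fun wl s _ => pv_body_eq wl s)
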